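-- pv_equiv track=rewrite | github.com/kazuki-hara/config-lens | src/compare/ai_review.py | _correlate_changes
-- ===== SOURCE A (Python) =====
-- def _correlate_changes(
--     additions: list[list[str]],
--     deletions: list[list[str]],
-- ) -> tuple[list[tuple[list[str], list[str]]], list[list[str]], list[list[str]]]:
--     """追加・削除リストから変更（修正）ペアを相関付ける。
--
--     同じ親パスかつ同じコマンドキーワード（先頭 2 語）を持つ追加・削除ペアを
--     「変更」として検出する。例えば同一インタフェース下の ``ip address`` が
--     旧値→新値に書き換わった場合、削除+追加ではなく変更として扱う。
--
--     Args:
--         additions: ``analyze_structural_diff`` の ``additional_parts``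
--         deletions: ``analyze_structural_diff`` の ``deletional_parts``
--
--     Returns:
--         タプル ``(変更ペアリスト, 純追加リスト, 純削除リスト)``。
--         変更ペアは ``(del_path, add_path)`` のタプル。
--     """
--
--     def _key(path: list[str]) -> tuple[tuple[str, ...], str]:
--         parent = tuple(path[:-1])
--         last = path[-1] if path else ""
--         words = last.split()
--         # 先頭 2 語をコマンドキーワードとして使う ("ip address", "neighbor" など)
--         keyword = " ".join(words[:2]) if len(words) >= 2 else last
--         return parent, keyword
--
--     # 削除パスをキーでインデックス化
--     del_index: dict[tuple[tuple[str, ...], str], list[int]] = {}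
--     for i, path in enumerate(deletions):
--         del_index.setdefault(_key(path), []).append(i)
--
--     modifications: list[tuple[list[str], list[str]]] = []
--     used_del: set[int] = set()
--     used_add: set[int] = set()
--
--     for j, add_path in enumerate(additions):
--         key = _key(add_path)
--         for i in del_index.get(key, []):
--             if i not in used_del:
--                 modifications.append((deletions[i], add_path))
--                 used_del.add(i)
--                 used_add.add(j)
--                 break
--
--     pure_additions = [p for j, p in enumerate(additions) if j not in used_add]
--     pure_deletions = [p for i, p in enumerate(deletions) if i not in used_del]
--     return modifications, pure_additions, pure_deletions
-- ===== SOURCE B (Python) =====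
-- def _correlate_changes(
--     additions: list[list[str]],
--     deletions: list[list[str]],
-- ) -> tuple[list[tuple[list[str], list[str]]], list[list[str]], list[list[str]]]:
--     """Group-and-zip variant: group BOTH lists by key, zip the per-key index
--     lists to obtain the whole pairing in one shot, then rebuild the three
--     outputs by enumeration."""
--
--     def _key(path: list[str]) -> tuple[tuple[str, ...], str]:
--         parent = tuple(path[:-1])
--         last = path[-1] if path else ""
--         words = last.split()
--         keyword = " ".join(words[:2]) if len(words) >= 2 else last
--         return parent, keyword
--
--     add_groups: dict[tuple[tuple[str, ...], str], list[int]] = {}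
--     for j, p in enumerate(additions):
--         add_groups.setdefault(_key(p), []).append(j)
--     del_groups: dict[tuple[tuple[str, ...], str], list[int]] = {}
--     for i, p in enumerate(deletions):
--         del_groups.setdefault(_key(p), []).append(i)
--
--     pair_of: dict[int, int] = {}
--     matched: set[int] = set()
--     for key, js in add_groups.items():
--         for j, i in zip(js, del_groups.get(key, [])):
--             pair_of[j] = i
--             matched.add(i)
--
--     modifications = [
--         (deletions[pair_of[j]], p)
--         for j, p in enumerate(additions)
--         if j in pair_of
--     ]
--     pure_additions = [p for j, p in enumerate(additions) if j not in pair_of]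
--     pure_deletions = [p for i, p in enumerate(deletions) if i not in matched]
--     return modifications, pure_additions, pure_deletions
-- ===== Notes on version B (the rewrite author's own statement) =====
-- stated objective: alternative
-- what changed: B replaces A's online greedy loop (scan each addition against the deletion index, skipping a used_del set) by a staged group-and-zip algorithm: both lists are grouped by key, the per-key index lists are zipped to produce the complete pairing at once, and the three outputs are then rebuilt by separate enumeration passes; correct because A's greedy 'first unused deletion of the same key' matches the k-th addition of a key with the k-th deletion of that key, which is exactly the zip.
import Mathlib
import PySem

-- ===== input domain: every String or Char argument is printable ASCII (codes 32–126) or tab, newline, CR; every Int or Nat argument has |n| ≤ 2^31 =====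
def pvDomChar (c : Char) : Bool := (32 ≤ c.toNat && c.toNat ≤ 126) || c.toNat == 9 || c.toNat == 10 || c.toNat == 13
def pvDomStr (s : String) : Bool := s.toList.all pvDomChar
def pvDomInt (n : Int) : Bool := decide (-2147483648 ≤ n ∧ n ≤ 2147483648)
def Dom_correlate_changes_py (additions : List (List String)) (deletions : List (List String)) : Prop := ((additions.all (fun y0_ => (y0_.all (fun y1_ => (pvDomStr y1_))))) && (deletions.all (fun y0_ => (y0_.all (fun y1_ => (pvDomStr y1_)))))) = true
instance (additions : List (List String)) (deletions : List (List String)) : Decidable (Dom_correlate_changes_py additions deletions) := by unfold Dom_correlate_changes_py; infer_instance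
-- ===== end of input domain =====

-- B replaces A's online greedy matching loop by a staged group-and-zip algorithm:
-- group both lists by key, zip the per-key index lists to form the whole pairing
-- at once, then rebuild the three outputs by enumeration (objective: alternative).

-- ===== PORT A =====
-- `_key(path)`: parent = path[:-1], last = path[-1] if path else "",
-- keyword = " ".join(last.split()[:2]) if ≥ 2 words else last.  Shared by both Pythons verbatim.
def pvKey (path : List String) : List String × String :=
  let parent := PySem.List.slice path none (some (-1))
  let last := (PySem.List.pyGet? path (-1)).getD ""  -- pyGet? is none exactly when path = []
  let words := PySem.Str.split₀ last
  let keyword := if 2 ≤ words.length then PySem.Str.join " " (words.take 2) else last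
  (parent, keyword)

-- `for i, path in enumerate(xs): groups.setdefault(_key(path), []).append(i)`
-- (enumerate ported with an explicit Nat counter — all indices are nonnegative; the
--  setdefault/append pair is exactly Dict.modify with default []).  This grouping loop
-- occurs verbatim in both Pythons (A: del_index; B: add_groups and del_groups).
def pvBuildIndex : List (List String) → Nat → PySem.Dict (List String × String) (List Nat) → PySem.Dict (List String × String) (List Nat)
  | [], _, d => d
  | p :: rest, i, d => pvBuildIndex rest (i + 1) (d.modify (pvKey p) [] (· ++ [i]))

-- A's inner loop `for i in del_index.get(key, []): if i not in used_del: … break`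
def pvFirstUnused (used : PySem.Set Nat) : List Nat → Option Nat
  | [] => none
  | i :: rest => if PySem.Set.contains used i then pvFirstUnused used rest else some i

-- A's main loop over `enumerate(additions)`; state = (modifications, used_del, used_add)
def pvLoopA (deletions : List (List String)) (idx : PySem.Dict (List String × String) (List Nat)) :
    List (List String) → Nat →
    List (List String × List String) × PySem.Set Nat × PySem.Set Nat →
    List (List String × List String) × PySem.Set Nat × PySem.Set Nat
  | [], _, st => st
  | a :: rest, j, (mods, ud, ua) =>
    match pvFirstUnused ud (idx.getD (pvKey a) []) with
    | some i => pvLoopA deletions idx rest (j + 1)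
        (mods ++ [(deletions.getD i [], a)], PySem.Set.add ud i, PySem.Set.add ua j)
    | none => pvLoopA deletions idx rest (j + 1) (mods, ud, ua)

-- `[p for j, p in enumerate(xs) if j not in s]` — used by A for both pure lists and by
-- B (verbatim the same comprehension) for pure_deletions.
def pvFilterNotIn (s : PySem.Set Nat) : List (List String) → Nat → List (List String)
  | [], _ => []
  | p :: rest, i =>
    if PySem.Set.contains s i then pvFilterNotIn s rest (i + 1)
    else p :: pvFilterNotIn s rest (i + 1)

def correlate_changes_py (additions : List (List String)) (deletions : List (List String)) : (List (List String × List String)) × List (List String) × List (List String) :=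
  let idx := pvBuildIndex deletions 0 PySem.Dict.empty
  let st := pvLoopA deletions idx additions 0 ([], PySem.Set.empty, PySem.Set.empty)
  (st.1, pvFilterNotIn st.2.2 additions 0, pvFilterNotIn st.2.1 deletions 0)

-- ===== PORT B =====
-- `for j, i in zip(js, dis): pair_of[j] = i; matched.add(i)`
def pvZipPairs : List Nat → List Nat → PySem.Dict Nat Nat × PySem.Set Nat → PySem.Dict Nat Nat × PySem.Set Nat
  | j :: js, i :: dis, (po, m) => pvZipPairs js dis (po.insert j i, PySem.Set.add m i)
  | _, _, st => st

-- `for key, js in add_groups.items(): … zip(js, del_groups.get(key, []))`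
def pvPairLoop (delGroups : PySem.Dict (List String × String) (List Nat)) :
    List ((List String × String) × List Nat) →
    PySem.Dict Nat Nat × PySem.Set Nat → PySem.Dict Nat Nat × PySem.Set Nat
  | [], st => st
  | (k, js) :: rest, st => pvPairLoop delGroups rest (pvZipPairs js (delGroups.getD k []) st)

-- `[(deletions[pair_of[j]], p) for j, p in enumerate(additions) if j in pair_of]`
def pvBuildMods (deletions : List (List String)) (po : PySem.Dict Nat Nat) :
    List (List String) → Nat → List (List String × List String)
  | [], _ => []
  | a :: rest, j =>
    match po.get? j with
    | some i => (deletions.getD i [], a) :: pvBuildMods deletions po rest (j + 1)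
    | none => pvBuildMods deletions po rest (j + 1)

-- `[p for j, p in enumerate(additions) if j not in pair_of]`
def pvPureAdds (po : PySem.Dict Nat Nat) : List (List String) → Nat → List (List String)
  | [], _ => []
  | a :: rest, j =>
    match po.get? j with
    | some _ => pvPureAdds po rest (j + 1)
    | none => a :: pvPureAdds po rest (j + 1)

def correlate_changes_py_alt (additions : List (List String)) (deletions : List (List String)) : (List (List String × List String)) × List (List String) × List (List String) :=
  let addGroups := pvBuildIndex additions 0 PySem.Dict.empty
  let delGroups := pvBuildIndex deletions 0 PySem.Dict.empty
  let pm := pvPairLoop delGroups addGroups.items (PySem.Dict.empty, PySem.Set.empty)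
  (pvBuildMods deletions pm.1 additions 0, pvPureAdds pm.1 additions 0,
   pvFilterNotIn pm.2 deletions 0)

-- ===== PRECONDITION & SPEC =====
def Spec_correlate_changes_py (additions : List (List String)) (deletions : List (List String)) (out : (List (List String × List String)) × List (List String) × List (List String)) : Prop := out = correlate_changes_py_alt additions deletions
instance (additions : List (List String)) (deletions : List (List String)) (out : (List (List String × List String)) × List (List String) × List (List String)) : Decidable (Spec_correlate_changes_py additions deletions out) := by unfold Spec_correlate_changes_py; infer_instance

-- ===== CLAIM (what is proved, stated in full; the proofs are below) =====
def Claim_equal_correlate_changes_py : Prop := ∀ (additions : List (List String)) (deletions : List (List String)), Dom_correlate_changes_py additions deletions → Spec_correlate_changes_py additions deletions (correlate_changes_py additions deletions)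

-- ===== LEMMAS AND PROOFS =====

-- The per-key index list (positions of key k, counting from s) — proof-side mirror of the grouping.
def pvLk (k : List String × String) : List (List String) → Nat → List Nat
  | [], _ => []
  | p :: rest, i => (if pvKey p == k then [i] else []) ++ pvLk k rest (i + 1)

theorem pvLk_lb (k : List String × String) :
    ∀ (ds : List (List String)) (s : Nat), ∀ x ∈ pvLk k ds s, s ≤ x := by
  intro ds
  induction ds with
  | nil => intro s x hx; simp [pvLk] at hx
  | cons p rest ih =>
    intro s x hx
    simp only [pvLk, List.mem_append] at hx
    rcases hx with hx | hx
    · split at hx <;> simp at hx; omega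
    · have := ih (s + 1) x hx; omega

theorem pvLk_ub (k : List String × String) :
    ∀ (ds : List (List String)) (s : Nat), ∀ x ∈ pvLk k ds s, x < s + ds.length := by
  intro ds
  induction ds with
  | nil => intro s x hx; simp [pvLk] at hx
  | cons p rest ih =>
    intro s x hx
    simp only [pvLk, List.mem_append] at hx
    rcases hx with hx | hx
    · have hx' : x = s := by split at hx <;> simp at hx; omega
      simp [hx', List.length_cons]
    · have := ih (s + 1) x hx; simp only [List.length_cons]; omega

theorem pvLk_key (k : List String × String) :
    ∀ (ds : List (List String)) (s : Nat), ∀ x ∈ pvLk k ds s, pvKey (ds.getD (x - s) []) = k := by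
  intro ds
  induction ds with
  | nil => intro s x hx; simp [pvLk] at hx
  | cons p rest ih =>
    intro s x hx
    simp only [pvLk, List.mem_append] at hx
    rcases hx with hx | hx
    · split at hx
      · simp at hx
        subst hx
        simp_all
      · simp at hx
    · have hge := pvLk_lb k rest (s + 1) x hx
      have := ih (s + 1) x hx
      have hxs : x - s = (x - (s + 1)) + 1 := by omega
      rw [hxs]
      simpa using this

theorem pvLk_pairwise (k : List String × String) (ds : List (List String)) (s : Nat) :
    (pvLk k ds s).Pairwise (· < ·) := by
  induction ds generalizing s with
  | nil => simp [pvLk]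
  | cons p rest ih =>
    simp only [pvLk]
    rw [List.pairwise_append]
    refine ⟨by split <;> simp, ih (s + 1), ?_⟩
    intro x hx y hy
    have h1 : x = s := by split at hx <;> simp at hx; omega
    have := pvLk_lb k rest (s + 1) y hy
    omega

theorem pvLk_nodup (k : List String × String) (ds : List (List String)) (s : Nat) :
    (pvLk k ds s).Nodup :=
  (pvLk_pairwise k ds s).imp (fun h => Nat.ne_of_lt h)

theorem pvLk_append (k : List String × String) :
    ∀ (xs ys : List (List String)) (s : Nat),
      pvLk k (xs ++ ys) s = pvLk k xs s ++ pvLk k ys (s + xs.length) := by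
  intro xs
  induction xs with
  | nil => intro ys s; simp [pvLk]
  | cons p rest ih =>
    intro ys s
    simp only [List.cons_append, pvLk, ih, List.length_cons, List.append_assoc]
    have : s + 1 + rest.length = s + (rest.length + 1) := by omega
    rw [this]

theorem pvLk_take_succ (k : List String × String) (xs : List (List String)) (j : Nat)
    (h : j < xs.length) :
    pvLk k (xs.take (j + 1)) 0 = pvLk k (xs.take j) 0 ++ (if pvKey xs[j] == k then [j] else []) := by
  rw [List.take_add_one, List.getElem?_eq_getElem h]
  rw [pvLk_append]
  simp [pvLk, List.length_take, Nat.min_eq_left (Nat.le_of_lt h)]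

-- position of index j inside its own key group: it sits exactly at the rank
-- |pvLk k (take j) 0| of the full group list
theorem pvLk_self (additions : List (List String)) (j : Nat) (h : j < additions.length)
    (k : List String × String) (hk : pvKey additions[j] = k) :
    (pvLk k additions 0)[(pvLk k (additions.take j) 0).length]? = some j := by
  have hlen : (additions.take j).length = j := by
    simp [List.length_take, Nat.min_eq_left (Nat.le_of_lt h)]
  have hdecomp : pvLk k additions 0 =
      pvLk k (additions.take j) 0 ++ pvLk k (additions.drop j) j := by
    conv_lhs => rw [← List.take_append_drop j additions]
    rw [pvLk_append, hlen]
    simp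
  rw [hdecomp]
  have hdropj : pvLk k (additions.drop j) j = j :: pvLk k (additions.drop (j + 1)) (j + 1) := by
    rw [List.drop_eq_getElem_cons h]
    simp only [pvLk, hk, beq_self_eq_true, if_true, List.singleton_append]
  rw [hdropj]
  rw [List.getElem?_append_right (Nat.le_refl _)]
  simp

theorem getD_pvBuildIndex (k : List String × String) :
    ∀ (ds : List (List String)) (s : Nat) (d : PySem.Dict (List String × String) (List Nat)),
      (pvBuildIndex ds s d).getD k [] = d.getD k [] ++ pvLk k ds s := by
  intro ds
  induction ds with
  | nil => intro s d; simp [pvBuildIndex, pvLk]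
  | cons p rest ih =>
    intro s d
    simp only [pvBuildIndex, pvLk]
    rw [ih]
    rw [PySem.Dict.getD_modify]
    split
    · rename_i h; subst h; simp
    · rename_i h
      have : (pvKey p == k) = false := by simpa using Ne.symm h
      simp [this]

theorem nodup_keys_pvBuildIndex :
    ∀ (ds : List (List String)) (s : Nat) (d : PySem.Dict (List String × String) (List Nat)),
      d.keys.Nodup → (pvBuildIndex ds s d).keys.Nodup := by
  intro ds
  induction ds with
  | nil => intro s d h; exact h
  | cons p rest ih =>
    intro s d h
    apply ih
    exact PySem.Dict.nodup_keys_insert _ _ _ h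

-- ===== proof-side intermediate: the per-key-pointer loop (links A's greedy scan to B's zip) =====
-- state = (ptr, modifications, pure_additions, matched-flags)
def pvLoopB (deletions : List (List String)) (idx : PySem.Dict (List String × String) (List Nat)) :
    List (List String) →
    PySem.Dict (List String × String) Nat × List (List String × List String) × List (List String) × List Bool →
    PySem.Dict (List String × String) Nat × List (List String × List String) × List (List String) × List Bool
  | [], st => st
  | a :: rest, (ptr, mods, pure, matched) =>
    let k := pvKey a
    pvLoopB deletions idx rest
      (match idx.get? k with
       | some lst =>
         let p := ptr.getD k 0
         if p < lst.length then
           (ptr.insert k (p + 1), mods ++ [(deletions.getD (lst.getD p 0) [], a)], pure,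
            matched.set (lst.getD p 0) true)
         else (ptr, mods, pure ++ [a], matched)
       | none => (ptr, mods, pure ++ [a], matched))

theorem pvFirstUnused_spec (used : PySem.Set Nat) :
    ∀ (L : List Nat) (p : Nat), p ≤ L.length →
      (∀ (m : Nat) (x : Nat), L[m]? = some x → (PySem.Set.contains used x = true ↔ m < p)) →
      pvFirstUnused used L = L[p]? := by
  intro L
  induction L with
  | nil =>
    intro p hp _
    have hp0 : p = 0 := by simpa using hp
    subst hp0
    simp [pvFirstUnused]
  | cons i rest ih =>
    intro p hp hchar
    have h0 := hchar 0 i (by simp)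
    match p with
    | 0 =>
      have : PySem.Set.contains used i = false := by
        cases h : PySem.Set.contains used i
        · rfl
        · exact absurd (h0.mp h) (by omega)
      simp only [pvFirstUnused]
      rw [this]
      simp
    | q + 1 =>
      have hc : PySem.Set.contains used i = true := h0.mpr (by omega)
      have hrec := ih q (by simpa using hp) (fun m x hm => by
        have h' := hchar (m + 1) x (by simpa using hm)
        exact h'.trans (by constructor <;> omega))
      simp only [pvFirstUnused]
      rw [hc]
      simpa using hrec

-- loop-A's used_add component: grows only by indices ≥ the running counter, never shrinks
theorem pvLoopA_ua_mono (deletions : List (List String)) (idx : PySem.Dict (List String × String) (List Nat)) :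
    ∀ (as : List (List String)) (j : Nat) st x, x ∈ st.2.2 →
      x ∈ (pvLoopA deletions idx as j st).2.2 := by
  intro as
  induction as with
  | nil => intro j st x hx; simpa [pvLoopA] using hx
  | cons a rest ih =>
    intro j st x hx
    obtain ⟨mods, ud, ua⟩ := st
    simp only [pvLoopA]
    cases pvFirstUnused ud (idx.getD (pvKey a) []) with
    | none => exact ih (j + 1) _ x hx
    | some i =>
      exact ih (j + 1) _ x (by rw [PySem.Set.mem_add]; exact Or.inl hx)

theorem pvLoopA_ua_bound (deletions : List (List String)) (idx : PySem.Dict (List String × String) (List Nat)) :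
    ∀ (as : List (List String)) (j : Nat) st x, x ∈ (pvLoopA deletions idx as j st).2.2 →
      x ∈ st.2.2 ∨ j ≤ x := by
  intro as
  induction as with
  | nil => intro j st x hx; simp only [pvLoopA] at hx; exact Or.inl hx
  | cons a rest ih =>
    intro j st x hx
    obtain ⟨mods, ud, ua⟩ := st
    simp only [pvLoopA] at hx
    cases h : pvFirstUnused ud (idx.getD (pvKey a) []) with
    | none =>
      rw [h] at hx
      rcases ih (j + 1) _ x hx with h' | h'
      · exact Or.inl h'
      · exact Or.inr (by omega)
    | some i =>
      rw [h] at hx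
      rcases ih (j + 1) _ x hx with h' | h'
      · rw [PySem.Set.mem_add] at h'
        rcases h' with h' | h'
        · exact Or.inl h'
        · exact Or.inr (by omega)
      · exact Or.inr (by omega)

-- the simulation invariant relating A's used_del set to the pointer loop's (ptr, matched) state
def pvInv (deletions : List (List String)) (ud : PySem.Set Nat)
    (ptr : PySem.Dict (List String × String) Nat) (matched : List Bool) : Prop :=
  matched.length = deletions.length ∧
  (∀ k, ptr.getD k 0 ≤ (pvLk k deletions 0).length) ∧
  (∀ k (m x : Nat), (pvLk k deletions 0)[m]? = some x →
      (matched.getD x false = true ↔ m < ptr.getD k 0)) ∧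
  (∀ x : Nat, x ∈ ud ↔ matched.getD x false = true)

theorem pvSim (deletions : List (List String)) (idx : PySem.Dict (List String × String) (List Nat))
    (hidx : ∀ k, idx.getD k [] = pvLk k deletions 0) :
    ∀ (as : List (List String)) (j : Nat) (mods : List (List String × List String))
      (ud ua : PySem.Set Nat) (ptr : PySem.Dict (List String × String) Nat)
      (pure : List (List String)) (matched : List Bool),
      pvInv deletions ud ptr matched → (∀ x ∈ ua, x < j) →
      (pvLoopB deletions idx as (ptr, mods, pure, matched)).2.1 =
        (pvLoopA deletions idx as j (mods, ud, ua)).1 ∧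
      (pvLoopB deletions idx as (ptr, mods, pure, matched)).2.2.1 =
        pure ++ pvFilterNotIn (pvLoopA deletions idx as j (mods, ud, ua)).2.2 as j ∧
      (∀ x : Nat, x ∈ (pvLoopA deletions idx as j (mods, ud, ua)).2.1 ↔
        (pvLoopB deletions idx as (ptr, mods, pure, matched)).2.2.2.getD x false = true) := by
  intro as
  induction as with
  | nil =>
    intro j mods ud ua ptr pure matched hinv _
    exact ⟨rfl, by simp [pvLoopB, pvFilterNotIn], fun x => hinv.2.2.2 x⟩
  | cons a rest ih =>
    intro j mods ud ua ptr pure matched hinv hua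
    obtain ⟨hlen, hptr, hmat, hud⟩ := hinv
    have hchar : ∀ (m x : Nat), (pvLk (pvKey a) deletions 0)[m]? = some x →
        (PySem.Set.contains ud x = true ↔ m < ptr.getD (pvKey a) 0) := by
      intro m x hmx
      rw [PySem.Set.contains_iff, hud x]
      exact hmat (pvKey a) m x hmx
    have hfu : pvFirstUnused ud (idx.getD (pvKey a) []) =
        (pvLk (pvKey a) deletions 0)[ptr.getD (pvKey a) 0]? := by
      rw [hidx (pvKey a)]
      exact pvFirstUnused_spec ud _ _ (hptr (pvKey a)) hchar
    by_cases hp : ptr.getD (pvKey a) 0 < (pvLk (pvKey a) deletions 0).length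
    · -- the addition finds an unused deletion: index i = L[p]
      have hi : (pvLk (pvKey a) deletions 0)[ptr.getD (pvKey a) 0]? =
          some ((pvLk (pvKey a) deletions 0)[ptr.getD (pvKey a) 0]'hp) :=
        List.getElem?_eq_getElem hp
      generalize hival : (pvLk (pvKey a) deletions 0)[ptr.getD (pvKey a) 0]'hp = i at hi
      have hiL : i ∈ pvLk (pvKey a) deletions 0 := List.mem_of_getElem? hi
      have hiLt : i < deletions.length := by
        have := pvLk_ub (pvKey a) deletions 0 i hiL; omega
      have hikey : pvKey (deletions.getD i []) = pvKey a := by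
        simpa using pvLk_key (pvKey a) deletions 0 i hiL
      -- reduce A one step
      have hA : pvLoopA deletions idx (a :: rest) j (mods, ud, ua) =
          pvLoopA deletions idx rest (j + 1)
            (mods ++ [(deletions.getD i [], a)], PySem.Set.add ud i, PySem.Set.add ua j) := by
        simp only [pvLoopA, hfu, hi]
      -- reduce the pointer loop one step
      obtain ⟨lst, hlst⟩ : ∃ lst, idx.get? (pvKey a) = some lst := by
        rcases hg : idx.get? (pvKey a) with _ | lst
        · exfalso
          have hemp : idx.getD (pvKey a) [] = [] := by
            rw [PySem.Dict.getD_eq_get?_getD, hg]; rfl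
          rw [hidx (pvKey a)] at hemp
          rw [hemp] at hp; simp at hp
        · exact ⟨lst, rfl⟩
      have hlstL : lst = pvLk (pvKey a) deletions 0 := by
        have h1 := PySem.Dict.getD_eq_get?_getD idx (pvKey a) ([] : List Nat)
        rw [hlst] at h1
        rw [← hidx (pvKey a), h1]; rfl
      subst hlstL
      have hgd : (pvLk (pvKey a) deletions 0).getD (ptr.getD (pvKey a) 0) 0 = i := by
        rw [List.getD_eq_getElem?_getD, hi]; rfl
      have hB : pvLoopB deletions idx (a :: rest) (ptr, mods, pure, matched) =
          pvLoopB deletions idx rest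
            (ptr.insert (pvKey a) (ptr.getD (pvKey a) 0 + 1),
             mods ++ [(deletions.getD i [], a)], pure, matched.set i true) := by
        simp only [pvLoopB, hlst, hgd]
        rw [if_pos hp]
      -- the invariant is preserved
      have hmlen : i < matched.length := by rw [hlen]; exact hiLt
      have hset_self : (matched.set i true).getD i false = true := by
        rw [List.getD_eq_getElem?_getD, List.getElem?_set_self hmlen]; rfl
      have hset_ne : ∀ x, x ≠ i → (matched.set i true).getD x false = matched.getD x false := by
        intro x hx
        rw [List.getD_eq_getElem?_getD, List.getElem?_set_ne (fun h => hx h.symm),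
          ← List.getD_eq_getElem?_getD]
      have hinv' : pvInv deletions (PySem.Set.add ud i)
          (ptr.insert (pvKey a) (ptr.getD (pvKey a) 0 + 1)) (matched.set i true) := by
        refine ⟨by simpa using hlen, ?_, ?_, ?_⟩
        · intro k'
          by_cases hk' : k' = pvKey a
          · subst hk'; rw [PySem.Dict.getD_insert_self]; omega
          · rw [PySem.Dict.getD_insert, if_neg hk']; exact hptr k'
        · intro k' m x hmx
          have hxmem : x ∈ pvLk k' deletions 0 := List.mem_of_getElem? hmx
          have hxkey : pvKey (deletions.getD x []) = k' := by
            simpa using pvLk_key k' deletions 0 x hxmem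
          by_cases hk' : k' = pvKey a
          · subst hk'
            by_cases hxi : x = i
            · subst hxi
              obtain ⟨hmlt, hLm⟩ := List.getElem?_eq_some_iff.mp hmx
              obtain ⟨hplt, hLp⟩ := List.getElem?_eq_some_iff.mp hi
              have hpw := List.pairwise_iff_getElem.mp (pvLk_pairwise (pvKey a) deletions 0)
              have hmp : m = ptr.getD (pvKey a) 0 := by
                rcases Nat.lt_trichotomy m (ptr.getD (pvKey a) 0) with h | h | h
                · exact absurd (hpw m _ hmlt hplt h) (by rw [hLm, hLp]; omega)
                · exact h
                · exact absurd (hpw _ m hplt hmlt h) (by rw [hLm, hLp]; omega)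
              rw [hset_self, PySem.Dict.getD_insert_self]
              simp [hmp]
            · rw [hset_ne x hxi, PySem.Dict.getD_insert_self]
              have hold := hmat (pvKey a) m x hmx
              have hmne : m ≠ ptr.getD (pvKey a) 0 := by
                intro h; subst h
                exact hxi (by have := hmx.symm.trans hi; injection this)
              constructor
              · intro hh; have := hold.mp hh; omega
              · intro hh; exact hold.mpr (by omega)
          · have hxi : x ≠ i := by
              intro h; subst h; rw [hikey] at hxkey; exact hk' hxkey.symm
            rw [hset_ne x hxi, PySem.Dict.getD_insert, if_neg hk']
            exact hmat k' m x hmx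
        · intro x
          rw [PySem.Set.mem_add]
          by_cases hxi : x = i
          · subst hxi; rw [hset_self]; simp
          · rw [hset_ne x hxi]
            constructor
            · rintro (h | h)
              · exact (hud x).mp h
              · exact absurd h hxi
            · intro h; exact Or.inl ((hud x).mpr h)
      have hua' : ∀ x ∈ PySem.Set.add ua j, x < j + 1 := by
        intro x hx
        rw [PySem.Set.mem_add] at hx
        rcases hx with hx | hx
        · have := hua x hx; omega
        · omega
      obtain ⟨c1, c2, c3⟩ := ih (j + 1) (mods ++ [(deletions.getD i [], a)])
        (PySem.Set.add ud i) (PySem.Set.add ua j)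
        (ptr.insert (pvKey a) (ptr.getD (pvKey a) 0 + 1)) pure (matched.set i true) hinv' hua'
      rw [hA, hB]
      refine ⟨c1, ?_, c3⟩
      have hjmem : j ∈ (pvLoopA deletions idx rest (j + 1)
          (mods ++ [(deletions.getD i [], a)], PySem.Set.add ud i, PySem.Set.add ua j)).2.2 :=
        pvLoopA_ua_mono deletions idx rest (j + 1) _ j
          (by rw [PySem.Set.mem_add]; exact Or.inr rfl)
      have hcj := (PySem.Set.contains_iff _ j).mpr hjmem
      rw [c2]
      simp only [pvFilterNotIn, hcj, if_true]
    · -- no unused deletion with this key: p = |L|, both sides take the "pure addition" branch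
      have hnone : (pvLk (pvKey a) deletions 0)[ptr.getD (pvKey a) 0]? = none := by
        rw [List.getElem?_eq_none_iff]; omega
      have hA : pvLoopA deletions idx (a :: rest) j (mods, ud, ua) =
          pvLoopA deletions idx rest (j + 1) (mods, ud, ua) := by
        simp only [pvLoopA, hfu, hnone]
      have hB : pvLoopB deletions idx (a :: rest) (ptr, mods, pure, matched) =
          pvLoopB deletions idx rest (ptr, mods, pure ++ [a], matched) := by
        rcases hg : idx.get? (pvKey a) with _ | lst
        · simp only [pvLoopB, hg]
        · have hlstL : lst = pvLk (pvKey a) deletions 0 := by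
            have h1 := PySem.Dict.getD_eq_get?_getD idx (pvKey a) ([] : List Nat)
            rw [hg] at h1
            rw [← hidx (pvKey a), h1]; rfl
          subst hlstL
          simp only [pvLoopB, hg]
          rw [if_neg hp]
      obtain ⟨c1, c2, c3⟩ := ih (j + 1) mods ud ua ptr (pure ++ [a]) matched
        ⟨hlen, hptr, hmat, hud⟩ (fun x hx => by have := hua x hx; omega)
      rw [hA, hB]
      refine ⟨c1, ?_, c3⟩
      have hjn : j ∉ (pvLoopA deletions idx rest (j + 1) (mods, ud, ua)).2.2 := by
        intro hmem
        rcases pvLoopA_ua_bound deletions idx rest (j + 1) _ j hmem with h | h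
        · have := hua j h; omega
        · omega
      have hcj : PySem.Set.contains (pvLoopA deletions idx rest (j + 1) (mods, ud, ua)).2.2 j = false := by
        cases hc : PySem.Set.contains (pvLoopA deletions idx rest (j + 1) (mods, ud, ua)).2.2 j
        · rfl
        · exact absurd ((PySem.Set.contains_iff _ j).mp hc) hjn
      rw [c2]
      simp only [pvFilterNotIn, hcj, Bool.false_eq_true, if_false, List.append_assoc]
      simp

-- ===== zip / pair-loop characterizations (B side) =====

theorem pvZipPairs_get_untouched :
    ∀ (js dis : List Nat) (st : PySem.Dict Nat Nat × PySem.Set Nat) (q : Nat),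
      q ∉ js.take dis.length → (pvZipPairs js dis st).1.get? q = st.1.get? q := by
  intro js
  induction js with
  | nil => intro dis st q _; cases dis <;> rfl
  | cons j js' ih =>
    intro dis st q hq
    cases dis with
    | nil => rfl
    | cons i dis' =>
      obtain ⟨po, m⟩ := st
      simp only [List.length_cons, List.take_succ_cons, List.mem_cons, not_or] at hq
      simp only [pvZipPairs]
      rw [ih dis' _ q hq.2]
      exact PySem.Dict.get?_insert_of_ne po i (fun h => hq.1 h)

theorem pvZipPairs_get_hit :
    ∀ (js dis : List Nat) (st : PySem.Dict Nat Nat × PySem.Set Nat) (m : Nat)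
      (_ : js.Nodup) (hm : m < js.length) (_ : m < dis.length),
      (pvZipPairs js dis st).1.get? js[m] = some dis[m] := by
  intro js
  induction js with
  | nil => intro dis st m _ hm _; simp at hm
  | cons j js' ih =>
    intro dis st m hnd hm hd
    cases dis with
    | nil => simp at hd
    | cons i dis' =>
      obtain ⟨po, mm⟩ := st
      simp only [pvZipPairs]
      match m with
      | 0 =>
        simp only [List.getElem_cons_zero]
        have hj : j ∉ js'.take dis'.length := fun h => (List.nodup_cons.mp hnd).1 (List.mem_of_mem_take h)
        rw [pvZipPairs_get_untouched js' dis' _ j hj]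
        exact PySem.Dict.get?_insert_self po j i
      | m' + 1 =>
        simp only [List.getElem_cons_succ]
        exact ih dis' _ m' (List.nodup_cons.mp hnd).2 (by simpa using hm) (by simpa using hd)

theorem pvZipPairs_mem_set :
    ∀ (js dis : List Nat) (st : PySem.Dict Nat Nat × PySem.Set Nat) (x : Nat),
      x ∈ (pvZipPairs js dis st).2 ↔ x ∈ st.2 ∨ x ∈ dis.take js.length := by
  intro js
  induction js with
  | nil => intro dis st x; cases dis <;> simp [pvZipPairs]
  | cons j js' ih =>
    intro dis st x
    cases dis with
    | nil => simp [pvZipPairs]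
    | cons i dis' =>
      obtain ⟨po, m⟩ := st
      simp only [pvZipPairs, List.length_cons, List.take_succ_cons, List.mem_cons]
      rw [ih]
      rw [PySem.Set.mem_add]
      tauto

theorem pvPairLoop_append (dg : PySem.Dict (List String × String) (List Nat)) :
    ∀ (l1 l2 : List ((List String × String) × List Nat)) st,
      pvPairLoop dg (l1 ++ l2) st = pvPairLoop dg l2 (pvPairLoop dg l1 st) := by
  intro l1
  induction l1 with
  | nil => intro l2 st; rfl
  | cons p rest ih =>
    intro l2 st
    obtain ⟨k, js⟩ := p
    simp only [List.cons_append, pvPairLoop]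
    exact ih l2 _

theorem pvPairLoop_get_untouched (dg : PySem.Dict (List String × String) (List Nat)) :
    ∀ (its : List ((List String × String) × List Nat)) st (q : Nat),
      (∀ p ∈ its, q ∉ p.2.take (dg.getD p.1 []).length) →
      (pvPairLoop dg its st).1.get? q = st.1.get? q := by
  intro its
  induction its with
  | nil => intro st q _; rfl
  | cons p rest ih =>
    intro st q hq
    obtain ⟨k, js⟩ := p
    simp only [pvPairLoop]
    rw [ih _ q (fun p hp => hq p (List.mem_cons_of_mem _ hp))]
    exact pvZipPairs_get_untouched js _ st q (hq (k, js) List.mem_cons_self)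

theorem pvPairLoop_mem_set (dg : PySem.Dict (List String × String) (List Nat)) :
    ∀ (its : List ((List String × String) × List Nat)) st (x : Nat),
      x ∈ (pvPairLoop dg its st).2 ↔ x ∈ st.2 ∨ ∃ p ∈ its, x ∈ (dg.getD p.1 []).take p.2.length := by
  intro its
  induction its with
  | nil => intro st x; simp [pvPairLoop]
  | cons p rest ih =>
    intro st x
    obtain ⟨k, js⟩ := p
    simp only [pvPairLoop]
    rw [ih]
    rw [pvZipPairs_mem_set]
    constructor
    · rintro ((h | h) | ⟨p, hp, h⟩)
      · exact Or.inl h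
      · exact Or.inr ⟨(k, js), List.mem_cons_self, h⟩
      · exact Or.inr ⟨p, List.mem_cons_of_mem _ hp, h⟩
    · rintro (h | ⟨p, hp, h⟩)
      · exact Or.inl (Or.inl h)
      · rcases List.mem_cons.mp hp with hp | hp
        · subst hp; exact Or.inl (Or.inr h)
        · exact Or.inr ⟨p, hp, h⟩

theorem mem_take_iff_nat (l : List Nat) (n x : Nat) :
    x ∈ l.take n ↔ ∃ m, m < min n l.length ∧ l[m]? = some x := by
  rw [List.mem_iff_getElem]
  constructor
  · rintro ⟨m, hm, hx⟩
    refine ⟨m, by simpa using hm, ?_⟩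
    have hml : m < l.length := by simp [List.length_take] at hm; omega
    rw [List.getElem?_eq_getElem hml]
    rw [← hx, List.getElem_take]
  · rintro ⟨m, hm, hx⟩
    have hml : m < l.length := by omega
    refine ⟨m, by simpa [List.length_take] using hm, ?_⟩
    rw [List.getElem?_eq_getElem hml] at hx
    rw [List.getElem_take]
    exact Option.some_injective _ hx

-- every group stored by pvBuildIndex is the corresponding pvLk list
theorem pvBuildIndex_items_val (xs : List (List String))
    (p : (List String × String) × List Nat)
    (hp : p ∈ (pvBuildIndex xs 0 PySem.Dict.empty).items) :
    p.2 = pvLk p.1 xs 0 := by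
  have hnd : (pvBuildIndex xs 0 PySem.Dict.empty).keys.Nodup :=
    nodup_keys_pvBuildIndex xs 0 PySem.Dict.empty (by simp)
  obtain ⟨k, v⟩ := p
  have hg : (pvBuildIndex xs 0 PySem.Dict.empty).get? k = some v :=
    PySem.Dict.get?_of_mem_items _ hp hnd
  have hgd : (pvBuildIndex xs 0 PySem.Dict.empty).getD k [] = v :=
    PySem.Dict.getD_of_get?_eq_some _ [] hg
  rw [← hgd]
  rw [getD_pvBuildIndex]
  simp

-- nonempty groups are present
theorem pvBuildIndex_mem_items (xs : List (List String)) (k : List String × String)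
    (hne : pvLk k xs 0 ≠ []) :
    (k, pvLk k xs 0) ∈ (pvBuildIndex xs 0 PySem.Dict.empty).items := by
  have hgd : (pvBuildIndex xs 0 PySem.Dict.empty).getD k [] = pvLk k xs 0 := by
    rw [getD_pvBuildIndex]; simp
  have hc : (pvBuildIndex xs 0 PySem.Dict.empty).contains k = true := by
    cases hcc : (pvBuildIndex xs 0 PySem.Dict.empty).contains k
    · exact absurd (hgd.symm.trans (PySem.Dict.getD_of_not_contains _ [] hcc)) hne
    · rfl
    -- contains=false would force the stored group to be the default []
  have hg : (pvBuildIndex xs 0 PySem.Dict.empty).get? k = some (pvLk k xs 0) := by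
    rw [PySem.Dict.contains_eq_isSome_get?] at hc
    rcases hgg : (pvBuildIndex xs 0 PySem.Dict.empty).get? k with _ | v
    · rw [hgg] at hc; simp at hc
    · have hv := PySem.Dict.getD_of_get?_eq_some _ ([] : List Nat) hgg
      rw [hgd] at hv
      rw [hv]
  exact PySem.Dict.mem_items_of_get?_eq_some _ hg

-- B's pairing dict: for every addition index q, pair_of.get? q is exactly
-- "the rank-of-q-th deletion index of q's key" (the zip pairing)
theorem pvPair_get (additions deletions : List (List String)) (q : Nat) (hq : q < additions.length) :
    (pvPairLoop (pvBuildIndex deletions 0 PySem.Dict.empty)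
      (pvBuildIndex additions 0 PySem.Dict.empty).items
      (PySem.Dict.empty, PySem.Set.empty)).1.get? q =
    (pvLk (pvKey additions[q]) deletions 0)[(pvLk (pvKey additions[q]) (additions.take q) 0).length]? := by
  have hdg : ∀ k, (pvBuildIndex deletions 0 PySem.Dict.empty).getD k [] = pvLk k deletions 0 := by
    intro k; rw [getD_pvBuildIndex]; simp
  set k0 := pvKey additions[q] with hk0
  set r := (pvLk k0 (additions.take q) 0).length with hr
  have hself : (pvLk k0 additions 0)[r]? = some q := pvLk_self additions q hq k0 rfl
  have hqmem : q ∈ pvLk k0 additions 0 := List.mem_of_getElem? hself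
  have hitems : (k0, pvLk k0 additions 0) ∈ (pvBuildIndex additions 0 PySem.Dict.empty).items :=
    pvBuildIndex_mem_items additions k0 (fun h => by rw [h] at hqmem; simp at hqmem)
  have hnd : (pvBuildIndex additions 0 PySem.Dict.empty).keys.Nodup :=
    nodup_keys_pvBuildIndex additions 0 PySem.Dict.empty (by simp)
  obtain ⟨l1, l2, hsplit⟩ := List.append_of_mem hitems
  have hkeys : ((l1 ++ (k0, pvLk k0 additions 0) :: l2).map Prod.fst).Nodup := by
    have : (pvBuildIndex additions 0 PySem.Dict.empty).keys =
        (l1 ++ (k0, pvLk k0 additions 0) :: l2).map Prod.fst := by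
      rw [← hsplit]; rfl
    rw [← this]; exact hnd
  have hsp := List.nodup_append.mp (show ((l1.map Prod.fst) ++ k0 :: (l2.map Prod.fst)).Nodup by
    simpa using hkeys)
  have hk0notl1 : ∀ p ∈ l1, p.1 ≠ k0 := by
    intro p hp heq
    exact hsp.2.2 p.1 (List.mem_map_of_mem (f := Prod.fst) hp) k0 List.mem_cons_self heq
  have hk0notl2 : ∀ p ∈ l2, p.1 ≠ k0 := by
    intro p hp heq
    exact (List.nodup_cons.mp hsp.2.1).1
      (by rw [← heq]; exact List.mem_map_of_mem (f := Prod.fst) hp)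
  -- any other group cannot contain q
  have hother : ∀ p, p ∈ l1 ∨ p ∈ l2 → p ∈ (pvBuildIndex additions 0 PySem.Dict.empty).items →
      q ∉ p.2.take ((pvBuildIndex deletions 0 PySem.Dict.empty).getD p.1 []).length := by
    intro p hmem hmemitems hqin
    have hval := pvBuildIndex_items_val additions p hmemitems
    have hqin' : q ∈ pvLk p.1 additions 0 := by
      rw [← hval]; exact List.mem_of_mem_take hqin
    have := pvLk_key p.1 additions 0 q hqin'
    have hkeyq : pvKey (additions.getD q []) = p.1 := by simpa using this
    have hgetd : additions.getD q [] = additions[q] := by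
      rw [List.getD_eq_getElem?_getD, List.getElem?_eq_getElem hq]; rfl
    rw [hgetd] at hkeyq
    rcases hmem with h | h
    · exact hk0notl1 p h (by rw [← hkeyq, hk0])
    · exact hk0notl2 p h (by rw [← hkeyq, hk0])
  have hmemit : ∀ p, p ∈ l1 ∨ p ∈ l2 → p ∈ (pvBuildIndex additions 0 PySem.Dict.empty).items := by
    intro p hp
    rw [hsplit]
    rcases hp with h | h
    · exact List.mem_append_left _ h
    · exact List.mem_append_right _ (List.mem_cons_of_mem _ h)
  rw [hsplit, pvPairLoop_append]
  simp only [pvPairLoop]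
  have hst1 : ∀ st : PySem.Dict Nat Nat × PySem.Set Nat,
      (pvPairLoop (pvBuildIndex deletions 0 PySem.Dict.empty) l1 st).1.get? q = st.1.get? q :=
    fun st => pvPairLoop_get_untouched _ l1 st q
      (fun p hp => hother p (Or.inl hp) (hmemit p (Or.inl hp)))
  rw [pvPairLoop_get_untouched _ l2 _ q
      (fun p hp => hother p (Or.inr hp) (hmemit p (Or.inr hp)))]
  rw [hdg k0]
  have hrlt : r < (pvLk k0 additions 0).length := (List.getElem?_eq_some_iff.mp hself).1
  have hrq : (pvLk k0 additions 0)[r]'hrlt = q := (List.getElem?_eq_some_iff.mp hself).2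
  by_cases hrd : r < (pvLk k0 deletions 0).length
  · have := pvZipPairs_get_hit (pvLk k0 additions 0) (pvLk k0 deletions 0)
      (pvPairLoop (pvBuildIndex deletions 0 PySem.Dict.empty) l1 (PySem.Dict.empty, PySem.Set.empty))
      r (pvLk_nodup k0 additions 0) hrlt hrd
    rw [hrq] at this
    rw [this]
    rw [List.getElem?_eq_getElem hrd]
  · have hqnot : q ∉ (pvLk k0 additions 0).take (pvLk k0 deletions 0).length := by
      intro hqin
      obtain ⟨m, hm, hmx⟩ := (mem_take_iff_nat _ _ _).mp hqin
      have hmr : m = r := by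
        obtain ⟨hml, hmval⟩ := List.getElem?_eq_some_iff.mp hmx
        have hinj := List.Nodup.getElem_inj_iff (pvLk_nodup k0 additions 0)
          (hi := hml) (hj := hrlt)
        exact hinj.mp (by rw [hmval, hrq])
      omega
    rw [pvZipPairs_get_untouched _ _ _ q hqnot]
    rw [hst1]
    rw [List.getElem?_eq_none_iff.mpr (show (pvLk k0 deletions 0).length ≤ r by omega)]
    simp [PySem.Dict.get?_empty]

-- B's matched set: exactly the deletion indices reached by some zip
theorem pvPair_set (additions deletions : List (List String)) (x : Nat) :
    (x ∈ (pvPairLoop (pvBuildIndex deletions 0 PySem.Dict.empty)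
      (pvBuildIndex additions 0 PySem.Dict.empty).items
      (PySem.Dict.empty, PySem.Set.empty)).2) ↔
    ∃ k, x ∈ (pvLk k deletions 0).take (pvLk k additions 0).length := by
  rw [pvPairLoop_mem_set]
  have hdg : ∀ k, (pvBuildIndex deletions 0 PySem.Dict.empty).getD k [] = pvLk k deletions 0 := by
    intro k; rw [getD_pvBuildIndex]; simp
  constructor
  · rintro (h | ⟨p, hp, h⟩)
    · simp [PySem.Set.empty] at h
    · refine ⟨p.1, ?_⟩
      have hval := pvBuildIndex_items_val additions p hp
      rw [hdg p.1] at h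
      rw [← hval]
      exact h
  · rintro ⟨k, h⟩
    have hne : pvLk k additions 0 ≠ [] := by
      intro he
      rw [he] at h
      simp at h
    refine Or.inr ⟨(k, pvLk k additions 0), pvBuildIndex_mem_items additions k hne, ?_⟩
    rw [hdg k]
    exact h

-- the pointer loop, run from the start state, computes exactly B's three passes
theorem pvPtrSim (additions deletions : List (List String))
    (idx : PySem.Dict (List String × String) (List Nat))
    (hidx : ∀ k, idx.getD k [] = pvLk k deletions 0)
    (PO : PySem.Dict Nat Nat)
    (hPO : ∀ q, q < additions.length → PO.get? q =
      (pvLk (pvKey (additions.getD q [])) deletions 0)[(pvLk (pvKey (additions.getD q [])) (additions.take q) 0).length]?) :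
    ∀ (rest : List (List String)) (j : Nat) (ptr : PySem.Dict (List String × String) Nat)
      (mods : List (List String × List String)) (pure : List (List String)) (matched : List Bool),
      additions.drop j = rest →
      matched.length = deletions.length →
      (∀ k, ptr.getD k 0 = min (pvLk k (additions.take j) 0).length (pvLk k deletions 0).length) →
      (∀ x : Nat, matched.getD x false = true ↔
        ∃ k m, m < min (pvLk k (additions.take j) 0).length (pvLk k deletions 0).length ∧
          (pvLk k deletions 0)[m]? = some x) →
      (pvLoopB deletions idx rest (ptr, mods, pure, matched)).2.1 = mods ++ pvBuildMods deletions PO rest j ∧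
      (pvLoopB deletions idx rest (ptr, mods, pure, matched)).2.2.1 = pure ++ pvPureAdds PO rest j ∧
      (∀ x : Nat, (pvLoopB deletions idx rest (ptr, mods, pure, matched)).2.2.2.getD x false = true ↔
        ∃ k m, m < min (pvLk k additions 0).length (pvLk k deletions 0).length ∧
          (pvLk k deletions 0)[m]? = some x) := by
  intro rest
  induction rest with
  | nil =>
    intro j ptr mods pure matched hdrop hlen hptr hmat
    have hjlen : additions.length ≤ j := by
      by_contra h
      have := congrArg List.length hdrop
      simp [List.length_drop] at this
      omega
    have htake : additions.take j = additions := List.take_of_length_le hjlen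
    refine ⟨by simp [pvLoopB, pvBuildMods], by simp [pvLoopB, pvPureAdds], ?_⟩
    intro x
    simp only [pvLoopB]
    rw [hmat x, htake]
  | cons a rest' ih =>
    intro j ptr mods pure matched hdrop hlen hptr hmat
    have hjlt : j < additions.length := by
      by_contra h
      rw [List.drop_eq_nil_of_le (by omega)] at hdrop
      exact List.cons_ne_nil a rest' hdrop.symm
    have hja : additions[j]? = some a := by
      have h0 : (additions.drop j)[0]? = additions[j]? := by
        rw [List.getElem?_drop]
        simp
      rw [hdrop] at h0
      simpa using h0.symm
    have hjval : additions[j] = a := by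
      have := List.getElem?_eq_getElem hjlt
      rw [hja] at this
      exact (Option.some_injective _ this.symm)
    have hgetd : additions.getD j [] = a := by
      rw [List.getD_eq_getElem?_getD, hja]; rfl
    have hdrop' : additions.drop (j + 1) = rest' := by
      have : additions.drop (j + 1) = (additions.drop j).drop 1 := by
        rw [List.drop_drop, Nat.add_comm]
      rw [this, hdrop]
      rfl
    set k0 := pvKey a with hk0
    set c := (pvLk k0 (additions.take j) 0).length with hc
    have hPOj : PO.get? j = (pvLk k0 deletions 0)[c]? := by
      rw [hPO j hjlt, hgetd]
    have htakesucc : pvLk k0 (additions.take (j + 1)) 0 =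
        pvLk k0 (additions.take j) 0 ++ [j] := by
      rw [pvLk_take_succ k0 additions j hjlt, hjval]
      simp [hk0]
    have htakesucc_ne : ∀ k, k ≠ k0 → pvLk k (additions.take (j + 1)) 0 =
        pvLk k (additions.take j) 0 := by
      intro k hk
      rw [pvLk_take_succ k additions j hjlt, hjval]
      have : (pvKey a == k) = false := by
        rw [beq_eq_false_iff_ne]
        exact fun h => hk (hk0.trans h).symm
      simp [this]
    by_cases hcd : c < (pvLk k0 deletions 0).length
    · -- matched step
      obtain ⟨lst, hlst⟩ : ∃ lst, idx.get? k0 = some lst := by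
        rcases hg : idx.get? k0 with _ | lst
        · exfalso
          have hemp : idx.getD k0 [] = [] := by
            rw [PySem.Dict.getD_eq_get?_getD, hg]; rfl
          rw [hidx k0] at hemp
          rw [hemp] at hcd; simp at hcd
        · exact ⟨lst, rfl⟩
      have hlstL : lst = pvLk k0 deletions 0 := by
        have h1 := PySem.Dict.getD_eq_get?_getD idx k0 ([] : List Nat)
        rw [hlst] at h1
        rw [← hidx k0, h1]; rfl
      subst hlstL
      have hpv : ptr.getD k0 0 = c := by rw [hptr k0]; omega
      set i := (pvLk k0 deletions 0)[c]'hcd with hi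
      have hiopt : (pvLk k0 deletions 0)[c]? = some i := List.getElem?_eq_getElem hcd
      have hgd : (pvLk k0 deletions 0).getD (ptr.getD k0 0) 0 = i := by
        rw [hpv, List.getD_eq_getElem?_getD, hiopt]; rfl
      have hilt : i < deletions.length := by
        have := pvLk_ub k0 deletions 0 i (List.mem_of_getElem? hiopt); omega
      have hB : pvLoopB deletions idx (a :: rest') (ptr, mods, pure, matched) =
          pvLoopB deletions idx rest'
            (ptr.insert k0 (ptr.getD k0 0 + 1),
             mods ++ [(deletions.getD i [], a)], pure, matched.set i true) := by
        simp only [pvLoopB, ← hk0, hlst, hgd]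
        rw [if_pos (by rw [hpv]; exact hcd)]
      have hmlen : i < matched.length := by rw [hlen]; exact hilt
      have hset_self : (matched.set i true).getD i false = true := by
        rw [List.getD_eq_getElem?_getD, List.getElem?_set_self hmlen]; rfl
      have hset_ne : ∀ x, x ≠ i → (matched.set i true).getD x false = matched.getD x false := by
        intro x hx
        rw [List.getD_eq_getElem?_getD, List.getElem?_set_ne (fun h => hx h.symm),
          ← List.getD_eq_getElem?_getD]
      have hptr' : ∀ k, (ptr.insert k0 (ptr.getD k0 0 + 1)).getD k 0 =
          min (pvLk k (additions.take (j + 1)) 0).length (pvLk k deletions 0).length := by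
        intro k
        by_cases hk : k = k0
        · subst hk
          rw [PySem.Dict.getD_insert_self, htakesucc, hpv]
          simp only [List.length_append, List.length_singleton]
          omega
        · rw [PySem.Dict.getD_insert, if_neg hk, htakesucc_ne k hk]
          exact hptr k
      have hmat' : ∀ x : Nat, (matched.set i true).getD x false = true ↔
          ∃ k m, m < min (pvLk k (additions.take (j + 1)) 0).length (pvLk k deletions 0).length ∧
            (pvLk k deletions 0)[m]? = some x := by
        intro x
        by_cases hxi : x = i
        · subst hxi
          rw [hset_self]
          simp only [true_iff]
          refine ⟨k0, c, ?_, hiopt⟩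
          rw [htakesucc]
          simp only [List.length_append, List.length_singleton]
          omega
        · rw [hset_ne x hxi, hmat x]
          constructor
          · rintro ⟨k, m, hm, hmx⟩
            refine ⟨k, m, ?_, hmx⟩
            by_cases hk : k = k0
            · subst hk
              rw [htakesucc]
              simp only [List.length_append, List.length_singleton]
              omega
            · rw [htakesucc_ne k hk]; exact hm
          · rintro ⟨k, m, hm, hmx⟩
            refine ⟨k, m, ?_, hmx⟩
            by_cases hk : k = k0
            · subst hk
              rw [htakesucc] at hm
              simp only [List.length_append, List.length_singleton] at hm
              have hmc : m ≠ c := by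
                intro he
                subst he
                have h2 := hmx.symm.trans hiopt
                injection h2 with h3
                exact hxi h3
              omega
            · rw [htakesucc_ne k hk] at hm; exact hm
      obtain ⟨c1, c2, c3⟩ := ih (j + 1) (ptr.insert k0 (ptr.getD k0 0 + 1))
        (mods ++ [(deletions.getD i [], a)]) pure (matched.set i true)
        hdrop' (by simpa using hlen) hptr' hmat'
      rw [hB]
      refine ⟨?_, ?_, c3⟩
      · rw [c1]
        simp only [pvBuildMods, hPOj, hiopt, List.append_assoc, List.singleton_append]
      · rw [c2]
        simp only [pvPureAdds, hPOj, hiopt]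
    · -- pure-addition step
      have hnone : (pvLk k0 deletions 0)[c]? = none := List.getElem?_eq_none_iff.mpr (by omega)
      have hB : pvLoopB deletions idx (a :: rest') (ptr, mods, pure, matched) =
          pvLoopB deletions idx rest' (ptr, mods, pure ++ [a], matched) := by
        rcases hg : idx.get? k0 with _ | lst
        · simp only [pvLoopB, ← hk0, hg]
        · have hlstL : lst = pvLk k0 deletions 0 := by
            have h1 := PySem.Dict.getD_eq_get?_getD idx k0 ([] : List Nat)
            rw [hg] at h1
            rw [← hidx k0, h1]; rfl
          subst hlstL
          simp only [pvLoopB, ← hk0, hg]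
          rw [if_neg (by rw [hptr k0]; omega)]
      have hmin_eq : ∀ k, min (pvLk k (additions.take (j + 1)) 0).length (pvLk k deletions 0).length =
          min (pvLk k (additions.take j) 0).length (pvLk k deletions 0).length := by
        intro k
        by_cases hk : k = k0
        · subst hk
          rw [htakesucc]
          simp only [List.length_append, List.length_singleton]
          omega
        · rw [htakesucc_ne k hk]
      have hptr' : ∀ k, ptr.getD k 0 =
          min (pvLk k (additions.take (j + 1)) 0).length (pvLk k deletions 0).length := by
        intro k; rw [hmin_eq k]; exact hptr k
      have hmat' : ∀ x : Nat, matched.getD x false = true ↔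
          ∃ k m, m < min (pvLk k (additions.take (j + 1)) 0).length (pvLk k deletions 0).length ∧
            (pvLk k deletions 0)[m]? = some x := by
        intro x
        rw [hmat x]
        constructor
        · rintro ⟨k, m, hm, hmx⟩; exact ⟨k, m, by rw [hmin_eq k]; exact hm, hmx⟩
        · rintro ⟨k, m, hm, hmx⟩; exact ⟨k, m, by rw [← hmin_eq k]; exact hm, hmx⟩
      obtain ⟨c1, c2, c3⟩ := ih (j + 1) ptr mods (pure ++ [a]) matched
        hdrop' hlen hptr' hmat'
      rw [hB]
      refine ⟨?_, ?_, c3⟩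
      · rw [c1]
        simp only [pvBuildMods, hPOj, hnone]
      · rw [c2]
        simp only [pvPureAdds, hPOj, hnone, List.append_assoc, List.singleton_append]

-- two index sets with the same membership filter identically
theorem pvFilterNotIn_congr (s t : PySem.Set Nat) (h : ∀ x : Nat, x ∈ s ↔ x ∈ t) :
    ∀ (ds : List (List String)) (i : Nat), pvFilterNotIn s ds i = pvFilterNotIn t ds i := by
  intro ds
  induction ds with
  | nil => intro i; rfl
  | cons p rest ih =>
    intro i
    have hc : PySem.Set.contains s i = PySem.Set.contains t i := by
      cases hcc : PySem.Set.contains t i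
      · cases hss : PySem.Set.contains s i
        · rfl
        · exfalso
          have := (h i).mp ((PySem.Set.contains_iff s i).mp hss)
          rw [← PySem.Set.contains_iff] at this
          rw [hcc] at this
          exact Bool.false_ne_true this
      · exact (PySem.Set.contains_iff s i).mpr ((h i).mpr ((PySem.Set.contains_iff t i).mp hcc))
    simp only [pvFilterNotIn, hc, ih]

-- ===== VERDICT (by name: the statement is the Claim_ definition above) =====
theorem correlate_changes_py_spec : Claim_equal_correlate_changes_py := by
  intro additions deletions _
  unfold Spec_correlate_changes_py
  have hidx : ∀ k, (pvBuildIndex deletions 0 PySem.Dict.empty).getD k [] = pvLk k deletions 0 := by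
    intro k
    rw [getD_pvBuildIndex]
    simp
  set idx := pvBuildIndex deletions 0 PySem.Dict.empty with hidxdef
  set pm := pvPairLoop idx (pvBuildIndex additions 0 PySem.Dict.empty).items
    (PySem.Dict.empty, PySem.Set.empty) with hpmdef
  -- characterize B's pairing dict
  have hPO : ∀ q, q < additions.length → pm.1.get? q =
      (pvLk (pvKey (additions.getD q [])) deletions 0)[(pvLk (pvKey (additions.getD q [])) (additions.take q) 0).length]? := by
    intro q hq
    have hgetd : additions.getD q [] = additions[q] := by
      rw [List.getD_eq_getElem?_getD, List.getElem?_eq_getElem hq]; rfl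
    rw [hgetd]
    exact pvPair_get additions deletions q hq
  -- simulate A's greedy loop by the pointer loop
  have hrep : ∀ x : Nat, (List.replicate deletions.length false).getD x false = false := by
    intro x
    rw [List.getD_eq_getElem?_getD, List.getElem?_replicate]
    split <;> rfl
  have hinv0 : pvInv deletions PySem.Set.empty PySem.Dict.empty
      (List.replicate deletions.length false) := by
    refine ⟨by simp, fun k => by simp [PySem.Dict.getD_empty], ?_, ?_⟩
    · intro k m x _
      rw [hrep x]
      simp
    · intro x
      rw [hrep x]
      simp [PySem.Set.empty]
  obtain ⟨a1, a2, a3⟩ := pvSim deletions idx hidx additions 0 [] PySem.Set.empty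
    PySem.Set.empty PySem.Dict.empty [] (List.replicate deletions.length false) hinv0
    (by intro x hx; simp [PySem.Set.empty] at hx)
  -- simulate the pointer loop by B's staged passes
  have hptr0 : ∀ k, (PySem.Dict.empty : PySem.Dict (List String × String) Nat).getD k 0 =
      min (pvLk k (additions.take 0) 0).length (pvLk k deletions 0).length := by
    intro k
    simp [PySem.Dict.getD_empty, pvLk]
  have hmat0 : ∀ x : Nat, (List.replicate deletions.length false).getD x false = true ↔
      ∃ k m, m < min (pvLk k (additions.take 0) 0).length (pvLk k deletions 0).length ∧
        (pvLk k deletions 0)[m]? = some x := by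
    intro x
    rw [hrep x]
    simp [pvLk]
  obtain ⟨b1, b2, b3⟩ := pvPtrSim additions deletions idx hidx pm.1 hPO additions 0
    PySem.Dict.empty [] [] (List.replicate deletions.length false)
    (by simp) (by simp) hptr0 hmat0
  -- combine
  change ((pvLoopA deletions idx additions 0 ([], PySem.Set.empty, PySem.Set.empty)).1,
      pvFilterNotIn (pvLoopA deletions idx additions 0 ([], PySem.Set.empty, PySem.Set.empty)).2.2 additions 0,
      pvFilterNotIn (pvLoopA deletions idx additions 0 ([], PySem.Set.empty, PySem.Set.empty)).2.1 deletions 0) =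
    (pvBuildMods deletions pm.1 additions 0, pvPureAdds pm.1 additions 0,
      pvFilterNotIn pm.2 deletions 0)
  refine Prod.ext ?_ (Prod.ext ?_ ?_)
  · dsimp only
    rw [← a1, b1]
    simp
  · dsimp only
    have a2' : (pvLoopB deletions idx additions
        (PySem.Dict.empty, [], [], List.replicate deletions.length false)).2.2.1 =
        pvFilterNotIn (pvLoopA deletions idx additions 0
          ([], PySem.Set.empty, PySem.Set.empty)).2.2 additions 0 := by simpa using a2
    have b2' : (pvLoopB deletions idx additions
        (PySem.Dict.empty, [], [], List.replicate deletions.length false)).2.2.1 =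
        pvPureAdds pm.1 additions 0 := by simpa using b2
    rw [← a2', b2']
  · dsimp only
    apply pvFilterNotIn_congr
    intro x
    rw [a3 x, b3 x, pvPair_set additions deletions x]
    constructor
    · rintro ⟨k, m, hm, hmx⟩
      exact ⟨k, (mem_take_iff_nat _ _ _).mpr ⟨m, by omega, hmx⟩⟩
    · rintro ⟨k, hk⟩
      obtain ⟨m, hm, hmx⟩ := (mem_take_iff_nat _ _ _).mp hk
      exact ⟨k, m, by omega, hmx⟩
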